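-- pv_equiv track=rewrite | github.com/4fuu/localagent | src/gateway/formatting.py | _find_next_unescaped
-- ===== SOURCE A (Python) =====
-- def _find_next_unescaped(text: str, target: str, index: int) -> int:
--     while index < len(text):
--         if text[index] == "\\":
--             index += 2
--             continue
--         if text[index] == target:
--             return index
--         index += 1
--     return -1
-- ===== SOURCE B (Python) =====
-- def _find_next_unescaped(text: str, target: str, index: int) -> int:
--     # Occurrence-jumping strategy: instead of walking every character in Python, use
--     # str.find to jump straight to each candidate occurrence of target, and
--     # accept it iff the run of consecutive backslashes immediately before it
--     # (not reaching below the start index) has even length.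
--     if len(target) != 1 or target == "\\":
--         # a single character never equals a longer/empty target, and a
--         # backslash always opens an escape, so it is never returned
--         return -1
--     pos = text.find(target, index)
--     while pos != -1:
--         bs = 0
--         while pos - 1 - bs >= index and text[pos - 1 - bs] == "\\":
--             bs += 1
--         if bs % 2 == 0:
--             return pos
--         pos = text.find(target, pos + 1)
--     return -1
-- ===== Notes on version B (the rewrite author's own statement) =====
-- stated objective: faster
-- what changed: Instead of A's Python-level character-by-character scan with index+=2 escape jumps, B jumps between candidate occurrences with str.find (a C-level scan) and accepts an occurrence iff the run of consecutive backslashes immediately before it (truncated at the start index) has even length, with an up-front guard for non-single-char or backslash targets which can never match.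
-- outside the precondition, e.g. on _find_next_unescaped('ab', 'a', -1): A returns 0, B returns -1
import Mathlib
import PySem

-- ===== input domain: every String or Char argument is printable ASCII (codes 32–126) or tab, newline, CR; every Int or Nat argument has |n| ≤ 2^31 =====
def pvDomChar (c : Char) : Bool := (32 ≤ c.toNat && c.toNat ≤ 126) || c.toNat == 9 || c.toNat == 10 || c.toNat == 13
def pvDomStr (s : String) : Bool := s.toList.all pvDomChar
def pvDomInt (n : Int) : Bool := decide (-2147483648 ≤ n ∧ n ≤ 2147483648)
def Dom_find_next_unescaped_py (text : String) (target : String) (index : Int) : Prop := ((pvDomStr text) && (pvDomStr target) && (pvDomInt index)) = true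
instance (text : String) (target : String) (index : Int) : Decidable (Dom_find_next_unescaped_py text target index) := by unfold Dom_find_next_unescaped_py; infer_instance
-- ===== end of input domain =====

-- B replaces A's char-by-char scan (with index+=2 escape jumps) by jumping between
-- occurrences of the target via str.find (C-level scan, measured faster) and testing the
-- parity of the backslash run before each occurrence; return value proved equal on Pre_.

-- ===== PORT A =====
-- A's while loop (fuel = remaining iterations, enough since index grows each step):
-- at a backslash jump two, at the target return, else advance one
def pvALoop (t : List Char) (g : List Char) : Nat → Int → Int
  | 0, _ => -1
  | Nat.succ n, i =>
    if i < (t.length : Int) then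
      match PySem.List.pyGet? t i with
      | none => -1  -- IndexError in Python; unreachable under Pre_
      | some c =>
        if c = '\\' then pvALoop t g n (i + 2)
        else if [c] = g then i
        else pvALoop t g n (i + 1)
    else -1

def find_next_unescaped_py (text : String) (target : String) (index : Int) : Int :=
  pvALoop text.toList target.toList ((text.toList.length : Int) - index).toNat index

-- ===== PORT B =====
-- text.find(c, i) for a single-char needle: scan from i (fuel = len+1 always suffices for i ≥ 0)
def pvFind (t : List Char) (c : Char) : Nat → Int → Int
  | 0, _ => -1
  | Nat.succ n, i =>
    if i < (t.length : Int) then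
      match PySem.List.pyGet? t i with
      | none => -1
      | some ch => if ch = c then i else pvFind t c n (i + 1)
    else -1

-- text.find clamps a negative start to max(len+start, 0) (exact Python str.find rule)
def pvFindFrom (t : List Char) (c : Char) (i : Int) : Int :=
  pvFind t c (t.length + 1) (if i < 0 then max ((t.length : Int) + i) 0 else i)

-- Source B's inner while loop: length of the backslash run ending at j, not reaching below lo
def pvCnt (t : List Char) (lo : Int) : Nat → Int → Int
  | 0, _ => 0
  | Nat.succ n, j =>
    if lo ≤ j ∧ PySem.List.pyGet? t j = some '\\' then pvCnt t lo n (j - 1) + 1 else 0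

-- Source B's outer while loop over occurrences of the target
def pvBOut (t : List Char) (c : Char) (lo : Int) : Nat → Int → Int
  | 0, _ => -1
  | Nat.succ n, i =>
    let p := pvFindFrom t c i
    if p = -1 then -1
    else if pvCnt t lo (t.length + 1) (p - 1) % 2 = 0 then p
    else pvBOut t c lo n (p + 1)

def find_next_unescaped_py_alt (text : String) (target : String) (index : Int) : Int :=
  match target.toList with
  | [c] =>
    if c = '\\' then -1
    else pvBOut text.toList c index (text.toList.length + 1) index
  | _ => -1

-- ===== PRECONDITION & SPEC =====
-- Pre_ excludes negative start indices, a corner outside the function's natural domain: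
-- there A either raises IndexError (index < -len) or, by Python's negative-index
-- wraparound, scans some suffix characters and then rescans the whole string from 0
-- (possibly returning a negative position), while B's str.find clamps the start —
-- neither accidental behaviour is the specified one.
def Pre_find_next_unescaped_py (text : String) (target : String) (index : Int) : Prop :=
  0 ≤ index
instance (text : String) (target : String) (index : Int) : Decidable (Pre_find_next_unescaped_py text target index) := by unfold Pre_find_next_unescaped_py; infer_instance

def pvWitness_find_next_unescaped_py : String × String × Int := ("a", "b", 0)

def Spec_find_next_unescaped_py (text : String) (target : String) (index : Int) (out : Int) : Prop := out = find_next_unescaped_py_alt text target index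
instance (text : String) (target : String) (index : Int) (out : Int) : Decidable (Spec_find_next_unescaped_py text target index out) := by unfold Spec_find_next_unescaped_py; infer_instance

-- ===== CLAIM (what is proved, stated in full; the proofs are below) =====
def Claim_equal_find_next_unescaped_py : Prop := ∀ (text : String) (target : String) (index : Int), Dom_find_next_unescaped_py text target index → Pre_find_next_unescaped_py text target index → Spec_find_next_unescaped_py text target index (find_next_unescaped_py text target index)

-- ===== LEMMAS AND PROOFS =====

lemma pvGet_some (t : List Char) (i : Int) (h0 : 0 ≤ i)
    (h1 : i < (t.length : Int)) : ∃ c, PySem.List.pyGet? t i = some c := by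
  cases hc : PySem.List.pyGet? t i with
  | some c => exact ⟨c, rfl⟩
  | none =>
    rw [PySem.List.pyGet?_eq_none_iff] at hc
    exact absurd ⟨by omega, h1⟩ hc

-- A never returns a position when the target is not a single non-backslash character
lemma pvALoop_noMatch (t g : List Char) (hg : ∀ ch : Char, [ch] = g → ch = '\\') :
    ∀ (n : Nat) (i : Int), pvALoop t g n i = -1 := by
  intro n
  induction n with
  | zero => intro i; simp [pvALoop]
  | succ n ih =>
    intro i
    rw [pvALoop]
    split_ifs with h
    · cases hc : PySem.List.pyGet? t i with
      | none => rfl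
      | some c =>
        by_cases hb : c = '\\'
        · simp [hb, ih]
        · by_cases hm : [c] = g
          · exact absurd (hg c hm) hb
          · simp [hb, hm, ih]
    · rfl

lemma pvALoop_exit (t g : List Char) (n : Nat) (i : Int) (h : ¬ i < (t.length : Int)) :
    pvALoop t g n i = -1 := by
  cases n <;> simp [pvALoop, h]

lemma pvFind_exit (t : List Char) (c : Char) (n : Nat) (i : Int)
    (h : ¬ i < (t.length : Int)) : pvFind t c n i = -1 := by
  cases n <;> simp [pvFind, h]

lemma pvFind_step (t : List Char) (c ch : Char) (n : Nat) (i : Int)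
    (h : i < (t.length : Int)) (hc : PySem.List.pyGet? t i = some ch) :
    pvFind t c (n + 1) i = if ch = c then i else pvFind t c n (i + 1) := by
  simp [pvFind, h, hc]

lemma pvFind_congr (t : List Char) (c : Char) :
    ∀ (n m : Nat) (i : Int), ((t.length : Int) - i).toNat < n →
      ((t.length : Int) - i).toNat < m → pvFind t c n i = pvFind t c m i := by
  intro n
  induction n with
  | zero => intro m i h; omega
  | succ n ih =>
    intro m i hn hm
    by_cases h : i < (t.length : Int)
    · obtain ⟨m', rfl⟩ : ∃ m', m = m' + 1 := ⟨m - 1, by omega⟩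
      by_cases h0 : 0 ≤ i
      · obtain ⟨ch, hc⟩ := pvGet_some t i h0 h
        rw [pvFind_step t c ch n i h hc, pvFind_step t c ch m' i h hc]
        by_cases he : ch = c
        · simp [he]
        · simp only [if_neg he]
          exact ih m' (i + 1) (by omega) (by omega)
      · -- i < 0: pyGet? wraps; unreachable from B's calls under Pre_, but handle it
        cases hc : PySem.List.pyGet? t i with
        | none => simp [pvFind, h, hc]
        | some ch =>
          rw [pvFind_step t c ch n i h hc, pvFind_step t c ch m' i h hc]
          by_cases he : ch = c
          · simp [he]
          · simp only [if_neg he]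
            exact ih m' (i + 1) (by omega) (by omega)
    · rw [pvFind_exit t c _ i h, pvFind_exit t c _ i h]

lemma pvFind_range (t : List Char) (c : Char) :
    ∀ (n : Nat) (i : Int), pvFind t c n i ≠ -1 →
      i ≤ pvFind t c n i ∧ pvFind t c n i < (t.length : Int) := by
  intro n
  induction n with
  | zero => intro i h; simp [pvFind] at h
  | succ n ih =>
    intro i h
    by_cases hl : i < (t.length : Int)
    · cases hc : PySem.List.pyGet? t i with
      | none =>
        rw [show pvFind t c (n + 1) i = -1 from by simp [pvFind, hl, hc]] at h
        exact absurd rfl h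
      | some ch =>
        rw [pvFind_step t c ch n i hl hc] at h ⊢
        by_cases he : ch = c
        · simp only [if_pos he] at h ⊢; exact ⟨le_refl i, hl⟩
        · simp only [if_neg he] at h ⊢
          obtain ⟨h1, h2⟩ := ih (i + 1) h
          exact ⟨by omega, h2⟩
    · rw [pvFind_exit t c _ i hl] at h; exact absurd rfl h

lemma pvFindFrom_nonneg (t : List Char) (c : Char) (i : Int) (h : 0 ≤ i) :
    pvFindFrom t c i = pvFind t c (t.length + 1) i := by
  unfold pvFindFrom
  rw [if_neg (by omega)]

lemma pvFindFrom_range (t : List Char) (c : Char) (i : Int) (h : pvFindFrom t c i ≠ -1) :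
    0 ≤ pvFindFrom t c i ∧ i ≤ pvFindFrom t c i ∧ pvFindFrom t c i < (t.length : Int) := by
  unfold pvFindFrom at *
  obtain ⟨h1, h2⟩ := pvFind_range t c (t.length + 1) _ h
  by_cases hi : i < 0
  · rw [if_pos hi] at *
    refine ⟨by omega, by omega, h2⟩
  · rw [if_neg hi] at *
    exact ⟨by omega, h1, h2⟩

lemma pvCnt_zero (t : List Char) (lo : Int) (n : Nat) (j : Int)
    (h : ¬ (lo ≤ j ∧ PySem.List.pyGet? t j = some '\\')) : pvCnt t lo n j = 0 := by
  cases n <;> simp_all [pvCnt]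

lemma pvCnt_step (t : List Char) (lo : Int) (n : Nat) (j : Int)
    (h1 : lo ≤ j) (h2 : PySem.List.pyGet? t j = some '\\') :
    pvCnt t lo (n + 1) j = pvCnt t lo n (j - 1) + 1 := by
  simp [pvCnt, h1, h2]

lemma pvCnt_congr (t : List Char) (lo : Int) :
    ∀ (n m : Nat) (j : Int), (j - lo + 1).toNat ≤ n → (j - lo + 1).toNat ≤ m →
      pvCnt t lo n j = pvCnt t lo m j := by
  intro n
  induction n with
  | zero =>
    intro m j hn hm
    have hj : ¬ lo ≤ j := by omega
    rw [pvCnt_zero t lo 0 j (by tauto), pvCnt_zero t lo m j (by tauto)]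
  | succ n ih =>
    intro m j hn hm
    by_cases h : lo ≤ j ∧ PySem.List.pyGet? t j = some '\\'
    · obtain ⟨m', rfl⟩ : ∃ m', m = m' + 1 := ⟨m - 1, by omega⟩
      rw [pvCnt_step t lo n j h.1 h.2, pvCnt_step t lo m' j h.1 h.2,
          ih m' (j - 1) (by omega) (by omega)]
    · rw [pvCnt_zero t lo _ j h, pvCnt_zero t lo m j h]

lemma pvBOut_congr (t : List Char) (c : Char) (lo : Int) :
    ∀ (n m : Nat) (i : Int), ((t.length : Int) - i).toNat < n →
      ((t.length : Int) - i).toNat < m → pvBOut t c lo n i = pvBOut t c lo m i := by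
  intro n
  induction n with
  | zero => intro m i h; omega
  | succ n ih =>
    intro m i hn hm
    obtain ⟨m', rfl⟩ : ∃ m', m = m' + 1 := ⟨m - 1, by omega⟩
    rw [pvBOut, pvBOut]
    by_cases hp : pvFindFrom t c i = -1
    · simp [hp]
    · obtain ⟨h0, h1, h2⟩ := pvFindFrom_range t c i hp
      simp only [if_neg hp]
      by_cases he : pvCnt t lo (t.length + 1) (pvFindFrom t c i - 1) % 2 = 0
      · simp [he]
      · simp only [if_neg he]
        exact ih m' (pvFindFrom t c i + 1) (by omega) (by omega)

lemma pvBOut_sameFind (t : List Char) (c : Char) (lo : Int) (n : Nat) (i i' : Int)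
    (h : pvFindFrom t c i = pvFindFrom t c i') :
    pvBOut t c lo (n + 1) i = pvBOut t c lo (n + 1) i' := by
  rw [pvBOut, pvBOut, h]

-- core equivalence of the two loops: if position i is reached unescaped (even
-- backslash run just before i), A's scan from i agrees with B's occurrence jumping
lemma pvMain (t : List Char) (c : Char) (lo : Int) (hc : c ≠ '\\') (hlo : 0 ≤ lo) :
    ∀ (nA : Nat) (i : Int), lo ≤ i → ((t.length : Int) - i).toNat ≤ nA →
      pvCnt t lo (t.length + 1) (i - 1) % 2 = 0 →
      pvALoop t [c] nA i = pvBOut t c lo (t.length + 1) i := by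
  have hccne : ¬ ('\\' = c) := fun hh => hc hh.symm
  intro nA
  induction nA with
  | zero =>
    intro i hi hfuel _
    have h : ¬ i < (t.length : Int) := by omega
    rw [pvALoop_exit t [c] 0 i h, pvBOut, pvFindFrom_nonneg t c i (by omega), pvFind_exit t c _ i h]
    simp
  | succ nA ih =>
    intro i hi hfuel heven
    by_cases h : i < (t.length : Int)
    · obtain ⟨ch, hget⟩ := pvGet_some t i (by omega) h
      rw [pvALoop]
      simp only [if_pos h, hget]
      by_cases hb : ch = '\\'
      · -- backslash at i: A jumps to i+2
        subst hb
        -- run before i+1 is odd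
        have hodd : pvCnt t lo (t.length + 1) i % 2 = 1 := by
          rw [pvCnt_step t lo t.length i hi hget,
              pvCnt_congr t lo t.length (t.length + 1) (i - 1) (by omega) (by omega)]
          omega
        -- run before i+2 is even
        have heven2 : pvCnt t lo (t.length + 1) (i + 2 - 1) % 2 = 0 := by
          rw [show i + 2 - 1 = i + 1 by ring]
          by_cases h2 : lo ≤ i + 1 ∧ PySem.List.pyGet? t (i + 1) = some '\\'
          · rw [pvCnt_step t lo t.length (i + 1) h2.1 h2.2,
                show i + 1 - 1 = i by ring,
                pvCnt_congr t lo t.length (t.length + 1) i (by omega) (by omega)]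
            omega
          · rw [pvCnt_zero t lo _ (i + 1) h2]; norm_num
        have hBeq : pvBOut t c lo (t.length + 1) i = pvBOut t c lo (t.length + 1) (i + 2) := by
          by_cases h1 : i + 1 < (t.length : Int)
          · obtain ⟨ch2, hget2⟩ := pvGet_some t (i + 1) (by omega) h1
            by_cases he2 : ch2 = c
            · -- escaped occurrence at i+1: B tests it, finds an odd run, and skips it
              have hfind : pvFindFrom t c i = i + 1 := by
                rw [pvFindFrom_nonneg t c i (by omega), pvFind_step t c '\\' t.length i h hget, if_neg hccne]
                obtain ⟨m, hm⟩ : ∃ m, t.length = m + 1 := ⟨t.length - 1, by omega⟩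
                rw [hm, pvFind_step t c ch2 m (i + 1) h1 hget2,
                    if_pos he2]
              have hodd' : ¬ (pvCnt t lo (t.length + 1) (i + 1 - 1) % 2 = 0) := by
                rw [show i + 1 - 1 = i by ring]; omega
              have hne : ¬ (i + 1 = -1) := by omega
              rw [pvBOut]
              simp only [hfind, if_neg hne, if_neg hodd']
              rw [show i + 1 + 1 = i + 2 by ring]
              exact pvBOut_congr t c lo t.length (t.length + 1) (i + 2) (by omega) (by omega)
            · -- no occurrence at i or i+1: find gives the same result
              have hfind : pvFindFrom t c i = pvFindFrom t c (i + 2) := by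
                rw [pvFindFrom_nonneg t c i (by omega), pvFindFrom_nonneg t c (i + 2) (by omega),
                    pvFind_step t c '\\' t.length i h hget, if_neg hccne]
                obtain ⟨m, hm⟩ : ∃ m, t.length = m + 1 := ⟨t.length - 1, by omega⟩
                rw [hm, pvFind_step t c ch2 m (i + 1) h1 hget2,
                    if_neg he2, show i + 1 + 1 = i + 2 by ring]
                exact pvFind_congr t c m (m + 1 + 1) (i + 2) (by omega) (by omega)
              obtain ⟨m, hm⟩ : ∃ m, t.length + 1 = m + 1 := ⟨t.length, rfl⟩
              rw [hm]; exact pvBOut_sameFind t c lo m i (i + 2) hfind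
          · -- i+1 past the end: find is -1 from both i and i+2
            have hfind : pvFindFrom t c i = pvFindFrom t c (i + 2) := by
              rw [pvFindFrom_nonneg t c i (by omega), pvFindFrom_nonneg t c (i + 2) (by omega),
                  pvFind_step t c '\\' t.length i h hget, if_neg hccne,
                  pvFind_exit t c t.length (i + 1) h1,
                  pvFind_exit t c (t.length + 1) (i + 2) (by omega)]
            obtain ⟨m, hm⟩ : ∃ m, t.length + 1 = m + 1 := ⟨t.length, rfl⟩
            rw [hm]; exact pvBOut_sameFind t c lo m i (i + 2) hfind
        rw [hBeq]
        exact ih (i + 2) (by omega) (by omega) heven2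
      · by_cases hmc : ch = c
        · -- unescaped occurrence at i: both return i
          have hml : ([ch] = [c]) := by rw [hmc]
          simp only [if_neg hb, if_pos hml]
          have hfind : pvFindFrom t c i = i := by
            rw [pvFindFrom_nonneg t c i (by omega), pvFind_step t c ch t.length i h hget, if_pos hmc]
          have hne : ¬ (i = -1) := by omega
          rw [pvBOut]
          simp only [hfind, if_neg hne]
          rw [if_pos heven]
        · -- ordinary character: both advance one
          have hml : ¬ ([ch] = [c]) := by simp [hmc]
          simp only [if_neg hb, if_neg hml]
          have heven1 : pvCnt t lo (t.length + 1) (i + 1 - 1) % 2 = 0 := by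
            rw [show i + 1 - 1 = i by ring,
                pvCnt_zero t lo _ i (by simp [hget, hb])]
            norm_num
          have hfind : pvFindFrom t c i = pvFindFrom t c (i + 1) := by
            rw [pvFindFrom_nonneg t c i (by omega), pvFindFrom_nonneg t c (i + 1) (by omega),
                pvFind_step t c ch t.length i h hget, if_neg hmc]
            exact pvFind_congr t c t.length (t.length + 1) (i + 1) (by omega) (by omega)
          have hBeq : pvBOut t c lo (t.length + 1) i = pvBOut t c lo (t.length + 1) (i + 1) := by
            obtain ⟨m, hm⟩ : ∃ m, t.length + 1 = m + 1 := ⟨t.length, rfl⟩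
            rw [hm]; exact pvBOut_sameFind t c lo m i (i + 1) hfind
          rw [hBeq]
          exact ih (i + 1) (by omega) (by omega) heven1
    · rw [pvALoop_exit t [c] _ i h, pvBOut, pvFindFrom_nonneg t c i (by omega), pvFind_exit t c _ i h]
      simp

-- ===== VERDICT (by name: the statement is the Claim_ definition above) =====
theorem find_next_unescaped_py_spec : Claim_equal_find_next_unescaped_py := by
  intro text target index _hdom hpre
  unfold Spec_find_next_unescaped_py find_next_unescaped_py find_next_unescaped_py_alt
  cases hg : target.toList with
  | nil => exact pvALoop_noMatch text.toList [] (by simp) _ index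
  | cons c rest =>
    cases rest with
    | nil =>
      by_cases hc : c = '\\'
      · subst hc
        exact pvALoop_noMatch text.toList ['\\'] (by simp) _ index
      · simp only [if_neg hc]
        exact pvMain text.toList c index hc hpre _ index le_rfl le_rfl
          (by rw [pvCnt_zero text.toList index _ (index - 1) (by omega)]; norm_num)
    | cons c2 rest2 =>
      exact pvALoop_noMatch text.toList (c :: c2 :: rest2)
        (by intro ch hch; simp at hch) _ index
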